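-- pv_equiv track=rewrite | github.com/ahrtz/store | algorithm/mode_pdfconvert.py | pdfgrap
-- ===== SOURCE A (Python) =====
-- def pdfgrap(text_list, textfont_list):
--     text_list2 = []
--     textfont_list2 = []
--     for y in range(len(text_list)):
--         if len(text_list[y]) > 0:
--             text_list2.append(text_list[y][0])
--             textfont_list2.append(textfont_list[y][0])
--
--             for x in range(1, len(text_list[y])):
--                 if textfont_list[y][x-1] == textfont_list[y][x]:
--                     text_list2[len(text_list2)-1] += text_list[y][x]
--                 else:
--                     text_list2.append(text_list[y][x])
--                     textfont_list2.append(textfont_list[y][x])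
--
--     return text_list2, textfont_list2
-- ===== SOURCE B (Python) =====
-- def pdfgrap(text_list, textfont_list):
--     texts = []
--     fonts = []
--     for y in range(len(text_list)):
--         row = text_list[y]
--         if not row:
--             continue
--         fontrow = textfont_list[y]
--         i, n = 0, len(row)
--         while i < n:
--             j = i + 1
--             while j < n and fontrow[j] == fontrow[i]:
--                 j += 1
--             texts.append(''.join(row[i:j]))
--             fonts.append(fontrow[i])
--             i = j
--     return texts, fonts
-- ===== Notes on version B (the rewrite author's own statement) =====
-- stated objective: simpler
-- what changed: B extracts each maximal same-font run per line with a two-pointer scan and emits it as one slice-join, instead of A's per-character previous-font comparison with in-place += mutation of the last output element.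
import Mathlib
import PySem

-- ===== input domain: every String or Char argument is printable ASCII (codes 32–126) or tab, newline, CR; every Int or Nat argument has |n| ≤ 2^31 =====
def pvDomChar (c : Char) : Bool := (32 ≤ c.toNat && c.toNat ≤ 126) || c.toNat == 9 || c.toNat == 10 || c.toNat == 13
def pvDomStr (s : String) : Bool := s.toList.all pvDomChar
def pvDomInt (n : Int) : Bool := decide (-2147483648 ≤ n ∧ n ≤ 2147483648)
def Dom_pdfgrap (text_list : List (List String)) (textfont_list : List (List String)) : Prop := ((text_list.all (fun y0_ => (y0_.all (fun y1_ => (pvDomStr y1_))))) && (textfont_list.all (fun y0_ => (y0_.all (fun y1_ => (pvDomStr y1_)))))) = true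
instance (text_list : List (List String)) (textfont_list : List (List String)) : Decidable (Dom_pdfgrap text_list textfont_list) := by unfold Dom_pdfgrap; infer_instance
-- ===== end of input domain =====

-- B merges each line's maximal same-font runs by a two-pointer run scan with slice-join instead of
-- A's previous-font comparison plus in-place += on the last output element; same cost, plainer structure.

-- ===== PORT A =====
-- text_list2[len(text_list2)-1] += s  (the loop guarantees the list is nonempty)
def pvAddLast (l : List String) (s : String) : List String :=
  match l with
  | [] => []
  | [a] => [a ++ s]
  | a :: rest => a :: pvAddLast rest s

-- inner 'for x in range(1, len(text_list[y]))' loop of A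
def pdfgrapLine (row frow : List String) (t2 f2 : List String) : List String × List String :=
  (PySem.List.pyRange 1 (PySem.List.len row) 1).foldl
    (fun (acc : List String × List String) (x : Int) =>
      if PySem.List.pyGetD frow (x - 1) "" = PySem.List.pyGetD frow x "" then
        (pvAddLast acc.1 (PySem.List.pyGetD row x ""), acc.2)
      else
        (acc.1 ++ [PySem.List.pyGetD row x ""], acc.2 ++ [PySem.List.pyGetD frow x ""]))
    (t2, f2)

def pdfgrap (text_list : List (List String)) (textfont_list : List (List String)) : List String × List String :=
  (PySem.List.pyRange 0 (PySem.List.len text_list) 1).foldl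
    (fun (acc : List String × List String) (y : Int) =>
      let row := PySem.List.pyGetD text_list y []
      if 0 < PySem.List.len row then
        let frow := PySem.List.pyGetD textfont_list y []
        pdfgrapLine row frow
          (acc.1 ++ [PySem.List.pyGetD row 0 ""]) (acc.2 ++ [PySem.List.pyGetD frow 0 ""])
      else acc)
    ([], [])

-- ===== PORT B =====
-- inner 'while j < n and fontrow[j] == fontrow[i]' scan: the run of entries whose font equals f,
-- concatenated (''.join of the slice), plus the remainder of the line
def pvRun (f : String) : List (String × String) → String × List (String × String)
  | [] => ("", [])
  | (s, g) :: rest =>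
      if g = f then
        let (x, r) := pvRun f rest
        (s ++ x, r)
      else ("", (s, g) :: rest)

theorem pvRun_snd_length_le (f : String) (l : List (String × String)) :
    (pvRun f l).2.length ≤ l.length := by
  induction l with
  | nil => simp [pvRun]
  | cons p rest ih =>
      obtain ⟨s, g⟩ := p
      simp only [pvRun]
      split
      · simpa using Nat.le_succ_of_le ih
      · simp

-- outer 'while i < n' loop of one line, over the (char, font) pairs of the line
def pvLine : List (String × String) → List String × List String
  | [] => ([], [])
  | (s, f) :: rest =>
      let p := pvRun f rest
      let q := pvLine p.2
      ((s ++ p.1) :: q.1, f :: q.2)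
  termination_by l => l.length
  decreasing_by
    exact Nat.lt_succ_of_le (pvRun_snd_length_le f rest)

-- 'for y in range(len(text_list))', skipping empty lines
def pdfgrap_alt (text_list : List (List String)) (textfont_list : List (List String)) : List String × List String :=
  match text_list, textfont_list with
  | [], _ => ([], [])
  | _ :: _, [] => ([], [])
  | row :: tl, frow :: ftl =>
      let rest := pdfgrap_alt tl ftl
      if row = [] then rest
      else
        let q := pvLine (row.zip frow)
        (q.1 ++ rest.1, q.2 ++ rest.2)

-- ===== PRECONDITION & SPEC =====
-- Pre_ = exactly the inputs on which A returns (no IndexError): every nonempty text row has a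
-- font row at the same index that is at least as long.
def Pre_pdfgrap (text_list : List (List String)) (textfont_list : List (List String)) : Prop :=
  ∀ y : Nat, y < text_list.length →
    text_list.getD y [] ≠ [] →
      y < textfont_list.length ∧ (text_list.getD y []).length ≤ (textfont_list.getD y []).length
instance (text_list : List (List String)) (textfont_list : List (List String)) : Decidable (Pre_pdfgrap text_list textfont_list) := by unfold Pre_pdfgrap; infer_instance

def pvWitness_pdfgrap : List (List String) × List (List String) :=
  ([["a", "b", "c"], []], [["F", "F", "G"], []])

def Spec_pdfgrap (text_list : List (List String)) (textfont_list : List (List String)) (out : List String × List String) : Prop := out = pdfgrap_alt text_list textfont_list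
instance (text_list : List (List String)) (textfont_list : List (List String)) (out : List String × List String) : Decidable (Spec_pdfgrap text_list textfont_list out) := by unfold Spec_pdfgrap; infer_instance

-- ===== CLAIM (what is proved, stated in full; the proofs are below) =====
def Claim_equal_pdfgrap : Prop := ∀ (text_list : List (List String)) (textfont_list : List (List String)), Dom_pdfgrap text_list textfont_list → Pre_pdfgrap text_list textfont_list → Spec_pdfgrap text_list textfont_list (pdfgrap text_list textfont_list)

-- ===== LEMMAS AND PROOFS =====

-- A's inner loop re-expressed structurally: walk the (char, font) pairs carrying the previous font
def pvAline (pf : String) (pairs : List (String × String)) (acc : List String × List String) :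
    List String × List String :=
  match pairs with
  | [] => acc
  | (s, f) :: rest =>
      pvAline f rest (if pf = f then (pvAddLast acc.1 s, acc.2) else (acc.1 ++ [s], acc.2 ++ [f]))

theorem pvAddLast_append (l : List String) (a s : String) :
    pvAddLast (l ++ [a]) s = l ++ [a ++ s] := by
  induction l with
  | nil => rfl
  | cons x l ih =>
      cases l with
      | nil => rfl
      | cons y l => simpa [pvAddLast] using ih

theorem pdfgrap_alt_nil_right (tl : List (List String)) : pdfgrap_alt tl [] = ([], []) := by
  cases tl <;> rfl

-- the state A reaches from (t2 ++ [t], f2 ++ [f]) equals B's run decomposition of the rest of the line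
theorem pvAline_eq (pairs : List (String × String)) :
    ∀ (f t : String) (t2 f2 : List String),
      pvAline f pairs (t2 ++ [t], f2 ++ [f]) =
        (t2 ++ (t ++ (pvRun f pairs).1) :: (pvLine (pvRun f pairs).2).1,
         f2 ++ f :: (pvLine (pvRun f pairs).2).2) := by
  induction pairs with
  | nil => intro f t t2 f2; simp [pvAline, pvRun, pvLine]
  | cons p rest ih =>
      intro f t t2 f2
      obtain ⟨s, g⟩ := p
      by_cases h : f = g
      · subst h
        simp only [pvAline, pvRun, if_true, pvAddLast_append]
        rw [ih f (t ++ s) t2 f2]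
        simp [String.append_assoc]
      · have h' : g ≠ f := fun hg => h hg.symm
        simp only [pvAline, pvRun, if_neg h, if_neg h']
        have := ih g s (t2 ++ [t]) (f2 ++ [f])
        rw [show (t2 ++ [t]) ++ [s] = t2 ++ [t] ++ [s] from rfl] at this
        rw [this]
        simp [pvLine, String.append_empty]

theorem lineIdx (row frow : List String) (hlen : row.length ≤ frow.length) :
    ∀ (n a : Nat), row.length ≤ a + n → 1 ≤ a → ∀ acc : List String × List String,
      (PySem.List.pyRange (a : Int) (PySem.List.len row) 1).foldl
        (fun (acc : List String × List String) (x : Int) =>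
          if PySem.List.pyGetD frow (x - 1) "" = PySem.List.pyGetD frow x "" then
            (pvAddLast acc.1 (PySem.List.pyGetD row x ""), acc.2)
          else
            (acc.1 ++ [PySem.List.pyGetD row x ""], acc.2 ++ [PySem.List.pyGetD frow x ""])) acc
      = pvAline (frow.getD (a - 1) "") ((row.drop a).zip (frow.drop a)) acc := by
  intro n
  induction n with
  | zero =>
      intro a hle h1 acc
      have hnil : PySem.List.pyRange (a : Int) ((row.length : Nat) : Int) 1 = [] :=
        PySem.List.pyRange_one_eq_nil (by omega)
      have hdrop : row.drop a = [] := List.drop_eq_nil_of_le (by omega)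
      simp only [PySem.List.len_eq, hnil, List.foldl_nil, hdrop, List.zip_nil_left, pvAline]
  | succ n ih =>
      intro a hle h1 acc
      by_cases ha : a < row.length
      · have hconsR : PySem.List.pyRange (a : Int) ((row.length : Nat) : Int) 1
            = (a : Int) :: PySem.List.pyRange ((a : Int) + 1) ((row.length : Nat) : Int) 1 :=
          PySem.List.pyRange_one_cons (by omega)
        have haf : a < frow.length := lt_of_lt_of_le ha hlen
        have ha1 : a - 1 < frow.length := by omega
        have hcast : (a : Int) + 1 = ((a + 1 : Nat) : Int) := by push_cast; ring
        have hcast1 : (a : Int) - 1 = ((a - 1 : Nat) : Int) := by omega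
        have ihc := ih (a + 1) (by omega) (by omega)
        simp only [PySem.List.len_eq] at ihc ⊢
        rw [hconsR]
        simp only [List.foldl_cons, hcast1, hcast, PySem.List.pyGetD_natCast]
        rw [ihc]
        have hdropR : row.drop a = row[a] :: row.drop (a + 1) := List.drop_eq_getElem_cons ha
        have hdropF : frow.drop a = frow[a] :: frow.drop (a + 1) := List.drop_eq_getElem_cons haf
        rw [hdropR, hdropF, List.zip_cons_cons]
        simp only [pvAline]
        rw [List.getD_eq_getElem row "" ha, List.getD_eq_getElem frow "" haf,
            List.getD_eq_getElem frow "" ha1]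
        have h2 : a + 1 - 1 = a := by omega
        rw [h2, List.getD_eq_getElem frow "" haf]
      · have hnil : PySem.List.pyRange (a : Int) ((row.length : Nat) : Int) 1 = [] :=
          PySem.List.pyRange_one_eq_nil (by omega)
        have hdrop : row.drop a = [] := List.drop_eq_nil_of_le (by omega)
        simp only [PySem.List.len_eq, hnil, List.foldl_nil, hdrop, List.zip_nil_left, pvAline]

-- one full line of A equals B's pvLine on the zipped line
theorem lineFull (row frow : List String) (hne : row ≠ []) (hlen : row.length ≤ frow.length)
    (t2 f2 : List String) :
    pdfgrapLine row frow (t2 ++ [PySem.List.pyGetD row 0 ""]) (f2 ++ [PySem.List.pyGetD frow 0 ""])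
      = (t2 ++ (pvLine (row.zip frow)).1, f2 ++ (pvLine (row.zip frow)).2) := by
  obtain ⟨r0, rt, rfl⟩ := List.exists_cons_of_ne_nil hne
  cases frow with
  | nil => simp at hlen
  | cons f0 ft =>
      have hline := lineIdx (r0 :: rt) (f0 :: ft) hlen (r0 :: rt).length 1 (by omega) (le_refl 1)
        (t2 ++ [PySem.List.pyGetD (r0 :: rt) 0 ""], f2 ++ [PySem.List.pyGetD (f0 :: ft) 0 ""])
      simp only [Nat.cast_one] at hline
      unfold pdfgrapLine
      rw [hline]
      have hg0 : PySem.List.pyGetD (r0 :: rt) 0 "" = r0 := by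
        simp [PySem.List.pyGetD_ofNat']
      have hg0' : PySem.List.pyGetD (f0 :: ft) 0 "" = f0 := by
        simp [PySem.List.pyGetD_ofNat']
      rw [hg0, hg0']
      simp only [List.drop_succ_cons, List.drop_zero, Nat.sub_self, List.getD_cons_zero]
      rw [pvAline_eq]
      simp [pvLine, List.zip_cons_cons]

-- A's outer loop from index a equals B's recursion on the dropped suffixes
theorem outerIdx (tl ftl : List (List String)) (hpre : Pre_pdfgrap tl ftl) :
    ∀ (n a : Nat), tl.length ≤ a + n → ∀ acc : List String × List String,
      (PySem.List.pyRange (a : Int) (PySem.List.len tl) 1).foldl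
        (fun (acc : List String × List String) (y : Int) =>
          let row := PySem.List.pyGetD tl y []
          if 0 < PySem.List.len row then
            let frow := PySem.List.pyGetD ftl y []
            pdfgrapLine row frow
              (acc.1 ++ [PySem.List.pyGetD row 0 ""]) (acc.2 ++ [PySem.List.pyGetD frow 0 ""])
          else acc) acc
      = (acc.1 ++ (pdfgrap_alt (tl.drop a) (ftl.drop a)).1,
         acc.2 ++ (pdfgrap_alt (tl.drop a) (ftl.drop a)).2) := by
  intro n
  induction n with
  | zero =>
      intro a hle acc
      have hnil : PySem.List.pyRange (a : Int) ((tl.length : Nat) : Int) 1 = [] :=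
        PySem.List.pyRange_one_eq_nil (by omega)
      have hdrop : tl.drop a = [] := List.drop_eq_nil_of_le (by omega)
      simp only [PySem.List.len_eq, hnil, List.foldl_nil, hdrop, pdfgrap_alt]
      simp
  | succ n ih =>
      intro a hle acc
      by_cases ha : a < tl.length
      · have hcons : PySem.List.pyRange (a : Int) ((tl.length : Nat) : Int) 1
            = (a : Int) :: PySem.List.pyRange ((a : Int) + 1) ((tl.length : Nat) : Int) 1 :=
          PySem.List.pyRange_one_cons (by omega)
        have hcast : (a : Int) + 1 = ((a + 1 : Nat) : Int) := by push_cast; ring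
        have ihc := ih (a + 1) (by omega)
        simp only [PySem.List.len_eq] at ihc ⊢
        rw [hcons]
        simp only [List.foldl_cons, hcast, PySem.List.pyGetD_natCast]
        rw [List.getD_eq_getElem tl [] ha]
        have hdropT : tl.drop a = tl[a] :: tl.drop (a + 1) := List.drop_eq_getElem_cons ha
        by_cases hrow : tl[a] = []
        · -- empty line: A skips, B's pdfgrap_alt skips
          rw [if_neg (by simp [hrow])]
          rw [ihc]
          rw [hdropT, hrow]
          cases hft : ftl.drop a with
          | nil =>
              have hft1 : ftl.drop (a + 1) = [] := by
                rw [← List.drop_drop, hft]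
                rfl
              rw [hft1, pdfgrap_alt_nil_right, pdfgrap_alt_nil_right]
          | cons f0 fts =>
              have hft1 : ftl.drop (a + 1) = fts := by
                rw [← List.drop_drop, hft]
                rfl
              rw [hft1]
              simp [pdfgrap_alt]
        · -- nonempty line
          obtain ⟨haf, hll⟩ := hpre a ha (by rw [List.getD_eq_getElem tl [] ha]; exact hrow)
          rw [List.getD_eq_getElem tl [] ha] at hll
          rw [if_pos (by simp [List.length_pos_iff, hrow])]
          rw [List.getD_eq_getElem ftl [] haf] at hll ⊢
          rw [lineFull tl[a] ftl[a] hrow hll]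
          rw [ihc]
          rw [hdropT, List.drop_eq_getElem_cons haf]
          simp only [pdfgrap_alt, if_neg hrow]
          simp [List.append_assoc]
      · have hnil : PySem.List.pyRange (a : Int) ((tl.length : Nat) : Int) 1 = [] :=
          PySem.List.pyRange_one_eq_nil (by omega)
        have hdrop : tl.drop a = [] := List.drop_eq_nil_of_le (by omega)
        simp only [PySem.List.len_eq, hnil, List.foldl_nil, hdrop, pdfgrap_alt]
        simp

-- ===== VERDICT (by name: the statement is the Claim_ definition above) =====
theorem pdfgrap_spec : Claim_equal_pdfgrap := by
  intro tl ftl _hdom hpre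
  unfold Spec_pdfgrap pdfgrap
  have h := outerIdx tl ftl hpre tl.length 0 (by omega) ([], [])
  simp only [Nat.cast_zero, List.drop_zero, List.nil_append] at h
  exact h
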